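-- pv_equiv track=rewrite | github.com/Tomi2Guevara/MIP | server20.py/controlador.py | separarTrayectoria
-- ===== SOURCE A (Python) =====
-- def separarTrayectoria(trayectoria):
--     trayectoriaSeparada = []
--     comando = ""
--     for caracter in trayectoria:
--         if caracter.isupper() and (caracter == "G" or caracter == "M"):
--             trayectoriaSeparada.append(comando)
--             comando = caracter
--         else:
--             comando += caracter
--     trayectoriaSeparada.append(comando)
--     #elimino el primer elemento que es vacio
--     trayectoriaSeparada.pop(0)
--     return trayectoriaSeparada
-- ===== SOURCE B (Python) =====
-- def separarTrayectoria(trayectoria):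
--     # two-pass: find boundary positions, then slice between consecutive boundaries
--     idx = [i for i, c in enumerate(trayectoria) if c in ('G', 'M')]
--     bounds = list(zip(idx, idx[1:] + [len(trayectoria)]))
--     return [trayectoria[a:b] for a, b in bounds]
-- ===== Notes on version B (the rewrite author's own statement) =====
-- stated objective: alternative
-- what changed: Replaced the single-pass character accumulator with leftover-pop by a two-pass index-then-slice decomposition: collect the G/M boundary positions, then emit the substring between consecutive boundaries.
import Mathlib
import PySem

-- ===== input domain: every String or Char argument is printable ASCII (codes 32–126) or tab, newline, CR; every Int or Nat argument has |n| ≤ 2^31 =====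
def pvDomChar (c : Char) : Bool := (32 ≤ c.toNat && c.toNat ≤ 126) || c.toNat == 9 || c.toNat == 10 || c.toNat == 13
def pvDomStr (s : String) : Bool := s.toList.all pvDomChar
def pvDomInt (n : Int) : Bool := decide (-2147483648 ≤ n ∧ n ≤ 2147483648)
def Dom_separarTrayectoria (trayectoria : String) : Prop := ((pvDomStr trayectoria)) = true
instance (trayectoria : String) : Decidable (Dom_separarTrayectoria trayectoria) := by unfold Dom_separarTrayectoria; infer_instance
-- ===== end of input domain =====

-- B replaces A's single-pass accumulator (append comando at each G/M, pop the leading leftover)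
-- by a two-pass index-then-slice decomposition; objective: alternative (same cost, different structure).

-- ===== PORT A =====
-- single pass: (trayectoriaSeparada, comando) accumulator; comando kept as List Char
def separarTrayectoria (trayectoria : String) : List String :=
  let r := trayectoria.toList.foldl
    (fun (acc : List String × List Char) caracter =>
      if caracter.isUpper ∧ (caracter = 'G' ∨ caracter = 'M') then
        (acc.1 ++ [String.ofList acc.2], [caracter])
      else
        (acc.1, acc.2 ++ [caracter]))
    ([], [])
  -- append final comando, then pop(0): the list is nonempty here, so pop(0) removes the head = tail
  (r.1 ++ [String.ofList r.2]).tail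

-- ===== PORT B =====
def separarTrayectoria_alt (trayectoria : String) : List String :=
  let cs := trayectoria.toList
  -- idx = [i for i, c in enumerate(trayectoria) if c in ('G', 'M')]
  let idx := ((PySem.List.enumerate cs).filter (fun p => p.2 == 'G' || p.2 == 'M')).map Prod.fst
  -- bounds = list(zip(idx, idx[1:] + [len(trayectoria)]))
  let bounds := List.zip idx (idx.tail ++ [Int.ofNat cs.length])
  -- [trayectoria[a:b] for a, b in bounds]
  bounds.map (fun ab => String.ofList (PySem.List.slice cs (some ab.1) (some ab.2)))

-- ===== PRECONDITION & SPEC =====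
def Spec_separarTrayectoria (trayectoria : String) (out : List String) : Prop := out = separarTrayectoria_alt trayectoria
instance (trayectoria : String) (out : List String) : Decidable (Spec_separarTrayectoria trayectoria out) := by unfold Spec_separarTrayectoria; infer_instance

-- ===== CLAIM (what is proved, stated in full; the proofs are below) =====
def Claim_equal_separarTrayectoria : Prop := ∀ (trayectoria : String), Dom_separarTrayectoria trayectoria → Spec_separarTrayectoria trayectoria (separarTrayectoria trayectoria)

-- ===== LEMMAS AND PROOFS =====

def pvIsB (c : Char) : Bool := c == 'G' || c == 'M'

lemma pvCondA (c : Char) : (c.isUpper ∧ (c = 'G' ∨ c = 'M')) ↔ pvIsB c = true := by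
  constructor
  · rintro ⟨_, h⟩; rcases h with h | h <;> simp [pvIsB, h]
  · intro h; simp [pvIsB] at h
    rcases h with h | h <;> subst h <;> exact ⟨by decide, by simp⟩

-- canonical recursive form both ports are reduced to
def pvG : List Char → List String
  | [] => []
  | c :: cs =>
      if pvIsB c then
        String.ofList (c :: cs.takeWhile (fun d => !pvIsB d)) :: pvG cs
      else pvG cs

-- A-side: the fold, started with any pending command
def pvF (cmd : List Char) : List Char → List String
  | [] => [String.ofList cmd]
  | c :: cs => if pvIsB c then String.ofList cmd :: pvF [c] cs else pvF (cmd ++ [c]) cs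

lemma pvFoldA (cs : List Char) : ∀ (ts : List String) (cmd : List Char),
    (cs.foldl
      (fun (acc : List String × List Char) caracter =>
        if caracter.isUpper ∧ (caracter = 'G' ∨ caracter = 'M') then
          (acc.1 ++ [String.ofList acc.2], [caracter])
        else
          (acc.1, acc.2 ++ [caracter]))
      (ts, cmd)).1 ++
      [String.ofList (cs.foldl
      (fun (acc : List String × List Char) caracter =>
        if caracter.isUpper ∧ (caracter = 'G' ∨ caracter = 'M') then
          (acc.1 ++ [String.ofList acc.2], [caracter])
        else
          (acc.1, acc.2 ++ [caracter]))
      (ts, cmd)).2] = ts ++ pvF cmd cs := by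
  induction cs with
  | nil => intro ts cmd; simp [pvF]
  | cons c cs ih =>
    intro ts cmd
    by_cases h : pvIsB c = true
    · simp only [List.foldl_cons, if_pos ((pvCondA c).mpr h), pvF, if_pos h]
      rw [ih]; simp
    · simp only [List.foldl_cons, if_neg (fun hh => h ((pvCondA c).mp hh)), pvF, if_neg h]
      exact ih ts (cmd ++ [c])

lemma pvF_eq (cs : List Char) : ∀ (cmd : List Char),
    pvF cmd cs = String.ofList (cmd ++ cs.takeWhile (fun d => !pvIsB d)) :: pvG cs := by
  induction cs with
  | nil => intro cmd; simp [pvF, pvG]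
  | cons c cs ih =>
    intro cmd
    by_cases h : pvIsB c = true
    · simp [pvF, pvG, h, List.takeWhile, ih]
    · simp [pvF, pvG, h, List.takeWhile, ih]

-- B-side: the boundary indices, at the Nat level
def pvIdx : List Char → List Nat
  | [] => []
  | c :: cs => if pvIsB c then 0 :: (pvIdx cs).map (· + 1) else (pvIdx cs).map (· + 1)

lemma pvEnumShift (xs : List Char) : ∀ (s : Int),
    PySem.List.enumerate xs (s + 1) = (PySem.List.enumerate xs s).map (fun p => (p.1 + 1, p.2)) := by
  induction xs with
  | nil => intro s; simp [PySem.List.enumerate_nil]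
  | cons x xs ih => intro s; simp [PySem.List.enumerate_cons, ih]

lemma pvIdxEq (cs : List Char) :
    ((PySem.List.enumerate cs).filter (fun p => pvIsB p.2)).map Prod.fst
      = (pvIdx cs).map Int.ofNat := by
  induction cs with
  | nil => simp [PySem.List.enumerate_nil, pvIdx]
  | cons c cs ih =>
    have e1 : PySem.List.enumerate (c :: cs)
        = (0, c) :: (PySem.List.enumerate cs).map (fun p => (p.1 + 1, p.2)) := by
      rw [show PySem.List.enumerate (c :: cs) = PySem.List.enumerate (c :: cs) 0 from rfl,
          PySem.List.enumerate_cons]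
      rw [show PySem.List.enumerate cs (0 + 1) = PySem.List.enumerate cs (0 + 1 : Int) from rfl]
      rw [show (0 + 1 : Int) = (0 : Int) + 1 from rfl, pvEnumShift]
    have e2 : ((PySem.List.enumerate cs).map (fun p : Int × Char => (p.1 + 1, p.2))).filter
          (fun p => pvIsB p.2)
        = ((PySem.List.enumerate cs).filter (fun p => pvIsB p.2)).map (fun p => (p.1 + 1, p.2)) := by
      rw [List.filter_map]; rfl
    have e3 : (((PySem.List.enumerate cs).filter (fun p => pvIsB p.2)).map
          (fun p : Int × Char => (p.1 + 1, p.2))).map Prod.fst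
        = ((pvIdx cs).map Int.ofNat).map (fun n => n + 1) := by
      rw [List.map_map, show Prod.fst ∘ (fun p : Int × Char => (p.1 + 1, p.2))
            = (fun n : Int => n + 1) ∘ Prod.fst from rfl,
          ← List.map_map, ih]
    by_cases h : pvIsB c = true
    · rw [e1]
      simp only [List.filter_cons]
      rw [if_pos h, List.map_cons, e2, e3]
      simp [pvIdx, h, List.map_map, Function.comp_def, Int.ofNat_eq_natCast]
    · rw [e1]
      simp only [List.filter_cons]
      rw [if_neg h, e2, e3]
      simp [pvIdx, h, List.map_map, Function.comp_def, Int.ofNat_eq_natCast]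

-- B at the Nat level
def pvB (cs : List Char) : List String :=
  (List.zip (pvIdx cs) ((pvIdx cs).tail ++ [cs.length])).map
    (fun ab => String.ofList ((cs.drop ab.1).take (ab.2 - ab.1)))

lemma pvTakeWhile_eq_take (cs : List Char) :
    cs.takeWhile (fun d => !pvIsB d) = cs.take ((pvIdx cs).headD cs.length) := by
  induction cs with
  | nil => simp
  | cons c cs ih =>
    by_cases h : pvIsB c = true
    · simp [pvIdx, h, List.takeWhile]
    · have hh : (pvIdx (c :: cs)).headD (c :: cs).length = (pvIdx cs).headD cs.length + 1 := by
        simp only [pvIdx, h, if_false, Bool.false_eq_true]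
        cases pvIdx cs <;> simp
      rw [hh]
      simp [List.takeWhile, eq_false_of_ne_true h, ih]

lemma pvShift (cs : List Char) (c : Char) :
    (List.zip ((pvIdx cs).map (· + 1)) (((pvIdx cs).map (· + 1)).tail ++ [(c :: cs).length])).map
      (fun ab => String.ofList (((c :: cs).drop ab.1).take (ab.2 - ab.1))) = pvB cs := by
  unfold pvB
  rw [show ((pvIdx cs).map (· + 1)).tail = ((pvIdx cs).tail).map (· + 1) by
        cases pvIdx cs <;> simp]
  rw [show (((pvIdx cs).tail).map (· + 1) ++ [(c :: cs).length])
        = ((pvIdx cs).tail ++ [cs.length]).map (· + 1) by simp]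
  rw [List.zip_map, List.map_map]
  apply List.map_congr_left
  intro ab _
  simp [Nat.add_sub_add_right]

lemma pvB_eq_pvG (cs : List Char) : pvB cs = pvG cs := by
  induction cs with
  | nil => simp [pvB, pvIdx, pvG]
  | cons c cs ih =>
    by_cases h : pvIsB c = true
    · have hidx : pvIdx (c :: cs) = 0 :: (pvIdx cs).map (· + 1) := by simp [pvIdx, h]
      unfold pvB
      rw [hidx, List.tail_cons]
      cases hI : pvIdx cs with
      | nil =>
        have htw : cs.takeWhile (fun d => !pvIsB d) = cs := by
          rw [pvTakeWhile_eq_take, hI]; simp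
        have hB : pvB cs = [] := by unfold pvB; rw [hI]; simp
        simp [pvG, h, htw, ← ih, hB]
      | cons a I' =>
        have hs := pvShift cs c
        rw [hI] at hs
        simp only [List.map_cons, List.cons_append, List.zip_cons_cons,
          List.map_cons, List.tail_cons] at hs ⊢
        rw [hs, ih]
        simp only [pvG, if_pos h]
        congr 2
        rw [pvTakeWhile_eq_take, hI]
        simp
    · have hidx : pvIdx (c :: cs) = (pvIdx cs).map (· + 1) := by simp [pvIdx, h]
      unfold pvB
      rw [hidx, pvShift cs c, ih]
      simp [pvG, h]

lemma pvA_eq_pvG (t : String) : separarTrayectoria t = pvG t.toList := by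
  have e : separarTrayectoria t
      = ((t.toList.foldl
          (fun (acc : List String × List Char) caracter =>
            if caracter.isUpper ∧ (caracter = 'G' ∨ caracter = 'M') then
              (acc.1 ++ [String.ofList acc.2], [caracter])
            else
              (acc.1, acc.2 ++ [caracter]))
          ([], [])).1 ++
        [String.ofList ((t.toList.foldl
          (fun (acc : List String × List Char) caracter =>
            if caracter.isUpper ∧ (caracter = 'G' ∨ caracter = 'M') then
              (acc.1 ++ [String.ofList acc.2], [caracter])
            else
              (acc.1, acc.2 ++ [caracter]))
          ([], [])).2)]).tail := rfl
  rw [e, pvFoldA t.toList [] []]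
  rw [pvF_eq]
  simp

lemma pvAlt_eq_pvG (t : String) : separarTrayectoria_alt t = pvG t.toList := by
  have e : separarTrayectoria_alt t
      = (List.zip (((PySem.List.enumerate t.toList).filter (fun p => pvIsB p.2)).map Prod.fst)
          ((((PySem.List.enumerate t.toList).filter (fun p => pvIsB p.2)).map Prod.fst).tail
            ++ [Int.ofNat t.toList.length])).map
          (fun ab => String.ofList (PySem.List.slice t.toList (some ab.1) (some ab.2))) := rfl
  rw [e, pvIdxEq]
  rw [show ((pvIdx t.toList).map Int.ofNat).tail = ((pvIdx t.toList).tail).map Int.ofNat by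
        cases pvIdx t.toList <;> simp]
  rw [show ((pvIdx t.toList).tail).map Int.ofNat ++ [Int.ofNat t.toList.length]
        = ((pvIdx t.toList).tail ++ [t.toList.length]).map Int.ofNat by simp]
  rw [List.zip_map, List.map_map]
  rw [show ((fun ab : Int × Int => String.ofList (PySem.List.slice t.toList (some ab.1) (some ab.2))) ∘
        Prod.map Int.ofNat Int.ofNat)
        = fun ab : Nat × Nat => String.ofList ((t.toList.drop ab.1).take (ab.2 - ab.1)) by
      funext ab
      simp [Int.ofNat_eq_natCast, PySem.List.slice_natCast]]
  rw [← pvB_eq_pvG]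
  rfl

-- ===== VERDICT (by name: the statement is the Claim_ definition above) =====
theorem separarTrayectoria_spec : Claim_equal_separarTrayectoria := by
  intro t _
  show separarTrayectoria t = separarTrayectoria_alt t
  rw [pvA_eq_pvG, pvAlt_eq_pvG]
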